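-- pv_equiv track=rewrite | github.com/mrksht/openclaw-mini | src/openclaw/session/context_builder.py | _split_hot_warm
-- ===== SOURCE A (Python) =====
-- def _split_hot_warm(
--     messages: list[dict],
--     hot_turns: int,
-- ) -> tuple[list[dict], list[dict]]:
--     """Split *messages* into (warm, hot) by counting user-message turns from
--     the end.
--
--     A "turn" is one user message (and all the assistant / tool messages that
--     follow it before the next user message).
--
--     If there are fewer than *hot_turns* user messages the entire list is
--     returned as hot and warm is empty.
--
--     The boundary is placed at the index of the ``hot_turns``-th user message
--     from the end, so the warm slice never starts mid-tool-call.
--     """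
--     user_turns_seen = 0
--
--     for i in range(len(messages) - 1, -1, -1):
--         if messages[i].get("role") == "user":
--             user_turns_seen += 1
--             if user_turns_seen == hot_turns:
--                 # i is the start of the hot window
--                 return messages[:i], messages[i:]
--
--     # Fewer user messages than hot_turns — everything is hot
--     return [], messages
-- ===== SOURCE B (Python) =====
-- def _split_hot_warm(messages, hot_turns):
--     user_indices = [i for i, m in enumerate(messages) if m.get("role") == "user"]
--     if hot_turns <= 0 or len(user_indices) < hot_turns:
--         return [], messages
--     boundary = user_indices[len(user_indices) - hot_turns]
--     return messages[:boundary], messages[boundary:]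
-- ===== Notes on version B (the rewrite author's own statement) =====
-- stated objective: simpler
-- what changed: Replaces the backward scan with an early-exit user counter by one forward pass building the list of user-message indices and a direct selection of the boundary index from it.
import Mathlib
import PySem

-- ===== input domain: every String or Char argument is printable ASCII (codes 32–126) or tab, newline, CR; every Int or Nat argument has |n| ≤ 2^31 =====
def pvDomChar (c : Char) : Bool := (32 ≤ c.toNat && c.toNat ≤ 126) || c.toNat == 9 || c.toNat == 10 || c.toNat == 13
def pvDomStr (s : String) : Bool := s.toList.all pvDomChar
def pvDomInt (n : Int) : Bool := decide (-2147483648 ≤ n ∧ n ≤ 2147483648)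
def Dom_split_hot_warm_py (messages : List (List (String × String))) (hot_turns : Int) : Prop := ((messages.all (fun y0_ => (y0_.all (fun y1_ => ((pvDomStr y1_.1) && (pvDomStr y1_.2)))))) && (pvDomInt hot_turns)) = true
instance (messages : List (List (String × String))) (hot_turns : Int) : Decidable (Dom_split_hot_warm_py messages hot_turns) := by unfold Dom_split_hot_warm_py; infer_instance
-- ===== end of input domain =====

-- B replaces A's backward scan with an early-exit counter by a forward pass that
-- collects the user-message indices and selects the boundary index directly (objective: simpler).

-- ===== PORT A =====
-- m.get("role"): dict -> assoc list, first-match lookup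
def aRole (m : List (String × String)) : Option String := m.lookup "role"

-- the 'for i in range(len(messages)-1, -1, -1)' loop; fuel n means the next index is n-1;
-- messages[i] is always in range, so getD is exact; messages[:i]/messages[i:] with
-- 0 ≤ i ≤ len(messages) are exactly take/drop
def aGo (messages : List (List (String × String))) (hot_turns : Int) (seen : Int) :
    Nat → (List (List (String × String))) × (List (List (String × String)))
  | 0 => ([], messages)
  | n + 1 =>
    if aRole (messages.getD n []) == some "user" then
      if seen + 1 == hot_turns then (messages.take n, messages.drop n)
      else aGo messages hot_turns (seen + 1) n
    else aGo messages hot_turns seen n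

def split_hot_warm_py (messages : List (List (String × String))) (hot_turns : Int) :
    (List (List (String × String))) × (List (List (String × String))) :=
  aGo messages hot_turns 0 messages.length

-- ===== PORT B =====
-- m.get("role") == "user" inside the comprehension's filter (first-match assoc lookup)
def bIsUser (m : List (String × String)) : Bool :=
  (m.find? (fun p => p.1 == "role")).map (·.2) == some "user"

def split_hot_warm_py_alt (messages : List (List (String × String))) (hot_turns : Int) :
    (List (List (String × String))) × (List (List (String × String))) :=
  let user_indices : List Int :=
    (PySem.List.enumerate messages 0).filterMap (fun p => if bIsUser p.2 then some p.1 else none)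
  if hot_turns ≤ 0 ∨ (user_indices.length : Int) < hot_turns then ([], messages)
  else
    -- index len-hot_turns is in range here, so getD is exact; boundary ≥ 0 so toNat is exact
    let boundary : Int := user_indices.getD (user_indices.length - hot_turns.toNat) 0
    (messages.take boundary.toNat, messages.drop boundary.toNat)

-- ===== PRECONDITION & SPEC =====
def Spec_split_hot_warm_py (messages : List (List (String × String))) (hot_turns : Int) (out : (List (List (String × String))) × (List (List (String × String)))) : Prop := out = split_hot_warm_py_alt messages hot_turns
instance (messages : List (List (String × String))) (hot_turns : Int) (out : (List (List (String × String))) × (List (List (String × String)))) : Decidable (Spec_split_hot_warm_py messages hot_turns out) := by unfold Spec_split_hot_warm_py; infer_instance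

-- ===== CLAIM (what is proved, stated in full; the proofs are below) =====
def Claim_equal_split_hot_warm_py : Prop := ∀ (messages : List (List (String × String))) (hot_turns : Int), Dom_split_hot_warm_py messages hot_turns → Spec_split_hot_warm_py messages hot_turns (split_hot_warm_py messages hot_turns)

-- ===== LEMMAS AND PROOFS =====

-- user indices among the first n messages (B's comprehension restricted to a prefix)
def uIdx (messages : List (List (String × String))) (n : Nat) : List Int :=
  (PySem.List.enumerate (messages.take n) 0).filterMap (fun p => if bIsUser p.2 then some p.1 else none)

theorem aRole_eq_bIsUser (m : List (String × String)) :
    (aRole m == some "user") = bIsUser m := by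
  unfold aRole bIsUser
  induction m with
  | nil => rfl
  | cons p rest ih =>
    by_cases h : p.1 = "role"
    · simp [List.lookup, List.find?, h]
    · simp only [List.lookup, List.find?]
      have h1 : ("role" == p.1) = false := by simp [Ne.symm h]
      have h2 : (p.1 == "role") = false := by simp [h]
      rw [h1, h2]
      exact ih

theorem uIdx_succ (messages : List (List (String × String))) (n : Nat) (h : n < messages.length) :
    uIdx messages (n + 1) =
      uIdx messages n ++ (if bIsUser messages[n] then [(n : Int)] else []) := by
  have h1 : messages.take (n + 1) = messages.take n ++ [messages[n]] := by
    rw [List.take_add_one, List.getElem?_eq_getElem h]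
    rfl
  have hl : (messages.take n).length = n := by simp [Nat.le_of_lt h]
  unfold uIdx
  rw [h1, PySem.List.enumerate_append, List.filterMap_append, hl]
  congr 1
  by_cases hu : bIsUser messages[n] <;>
    simp [PySem.List.enumerate_cons, PySem.List.enumerate_nil, hu]

theorem aGo_eq (messages : List (List (String × String))) (hot : Int) :
    ∀ (n : Nat) (seen : Int), n ≤ messages.length → 0 ≤ seen → seen < hot →
      aGo messages hot seen n =
        (if (uIdx messages n).length < (hot - seen).toNat then ([], messages)
         else
           (messages.take ((uIdx messages n).getD
              ((uIdx messages n).length - (hot - seen).toNat) 0).toNat,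
            messages.drop ((uIdx messages n).getD
              ((uIdx messages n).length - (hot - seen).toNat) 0).toNat)) := by
  intro n
  induction n with
  | zero =>
    intro seen _ h0 hlt
    have : (uIdx messages 0).length = 0 := by simp [uIdx]
    rw [aGo, this, if_pos (by omega)]
  | succ n ih =>
    intro seen hle h0 hlt
    have hn : n < messages.length := by omega
    have hget : messages.getD n [] = messages[n] := List.getD_eq_getElem messages [] hn
    rw [aGo, hget, aRole_eq_bIsUser, uIdx_succ messages n hn]
    by_cases hu : bIsUser messages[n]
    · rw [if_pos hu, if_pos hu]
      by_cases heq : seen + 1 = hot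
      · have hb : (seen + 1 == hot) = true := by simp [heq]
        rw [hb, if_pos rfl]
        have hk : (hot - seen).toNat = 1 := by omega
        rw [hk]
        have hlen : (uIdx messages n ++ [(n : Int)]).length = (uIdx messages n).length + 1 := by
          simp
        rw [hlen, if_neg (by omega)]
        have : (uIdx messages n ++ [(n : Int)]).getD ((uIdx messages n).length + 1 - 1) 0
            = (n : Int) := by
          simp [List.getD]
        rw [this]
        simp
      · have hb : (seen + 1 == hot) = false := by simp [heq]
        rw [hb]
        simp only [Bool.false_eq_true, if_false]
        rw [ih (seen + 1) (by omega) (by omega) (by omega)]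
        have hk : (hot - (seen + 1)).toNat + 1 = (hot - seen).toNat := by omega
        set u := uIdx messages n with hu_def
        have hlen : (u ++ [(n : Int)]).length = u.length + 1 := by simp
        rw [hlen]
        by_cases hc : u.length < (hot - (seen + 1)).toNat
        · rw [if_pos hc, if_pos (by omega)]
        · rw [if_neg hc, if_neg (by omega)]
          have hidx : u.length + 1 - (hot - seen).toNat = u.length - (hot - (seen + 1)).toNat := by
            omega
          rw [hidx]
          have hlt2 : u.length - (hot - (seen + 1)).toNat < u.length := by omega
          have hgl : (u ++ [(n : Int)])[u.length - (hot - (seen + 1)).toNat]?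
              = u[u.length - (hot - (seen + 1)).toNat]? := List.getElem?_append_left hlt2
          simp only [List.getD, hgl]
    · rw [if_neg hu, if_neg hu]
      simp only [List.append_nil]
      exact ih seen (by omega) h0 hlt

theorem aGo_nonpos (messages : List (List (String × String))) (hot : Int) (hhot : hot ≤ 0) :
    ∀ (n : Nat) (seen : Int), 0 ≤ seen → aGo messages hot seen n = ([], messages) := by
  intro n
  induction n with
  | zero => intro seen _; rfl
  | succ n ih =>
    intro seen h0
    rw [aGo]
    have hb : (seen + 1 == hot) = false := by simp; omega
    rw [hb]
    by_cases hu : aRole (messages.getD n []) == some "user"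
    · rw [if_pos hu]
      simp only [Bool.false_eq_true, if_false]
      exact ih (seen + 1) (by omega)
    · rw [if_neg hu]
      exact ih seen h0

-- ===== VERDICT (by name: the statement is the Claim_ definition above) =====
theorem split_hot_warm_py_spec : Claim_equal_split_hot_warm_py := by
  intro messages hot _
  unfold Spec_split_hot_warm_py split_hot_warm_py split_hot_warm_py_alt
  by_cases hhot : hot ≤ 0
  · rw [aGo_nonpos messages hot hhot messages.length 0 le_rfl, if_pos (Or.inl hhot)]
  · have hhot' : 0 < hot := by omega
    rw [aGo_eq messages hot messages.length 0 le_rfl le_rfl hhot']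
    have huidx : uIdx messages messages.length =
        (PySem.List.enumerate messages 0).filterMap
          (fun p => if bIsUser p.2 then some p.1 else none) := by
      unfold uIdx; rw [List.take_length]
    rw [huidx]
    set u := (PySem.List.enumerate messages 0).filterMap
        (fun p => if bIsUser p.2 then some p.1 else none) with hu
    have hsub : hot - 0 = hot := by omega
    rw [hsub]
    by_cases hc : u.length < hot.toNat
    · rw [if_pos hc, if_pos (by omega)]
    · rw [if_neg hc, if_neg (by omega)]
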